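-- pv_equiv track=rewrite | github.com/ranjanisangeetha/ranjani | python experiment 3.py | find_number_occurrence
-- ===== SOURCE A (Python) =====
-- def find_number_occurrence(numbers, target):
--     positive_indices = []
--     negative_indices = []
--     occurrence = 0
--
--     for i, num in enumerate(numbers):
--         if num == target:
--             positive_indices.append(i)
--             negative_indices.append(i - len(numbers))
--             occurrence += 1
--
--     return positive_indices, negative_indices, occurrence
-- ===== SOURCE B (Python) =====
-- def find_number_occurrence(numbers, target):
--     # Jump between matches with list.index instead of testing every element.
--     positive_indices = []
--     start = 0
--     while True:
--         try:
--             start = numbers.index(target, start)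
--         except ValueError:
--             break
--         positive_indices.append(start)
--         start += 1
--     n = len(numbers)
--     return positive_indices, [i - n for i in positive_indices], len(positive_indices)
-- ===== Notes on version B (the rewrite author's own statement) =====
-- stated objective: alternative
-- what changed: B replaces A's single per-element scan maintaining three lockstep accumulators by a loop that jumps from match to match with list.index(target, start) (C-level search), then derives negative indices and the count from the collected positive indices.
import Mathlib
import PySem

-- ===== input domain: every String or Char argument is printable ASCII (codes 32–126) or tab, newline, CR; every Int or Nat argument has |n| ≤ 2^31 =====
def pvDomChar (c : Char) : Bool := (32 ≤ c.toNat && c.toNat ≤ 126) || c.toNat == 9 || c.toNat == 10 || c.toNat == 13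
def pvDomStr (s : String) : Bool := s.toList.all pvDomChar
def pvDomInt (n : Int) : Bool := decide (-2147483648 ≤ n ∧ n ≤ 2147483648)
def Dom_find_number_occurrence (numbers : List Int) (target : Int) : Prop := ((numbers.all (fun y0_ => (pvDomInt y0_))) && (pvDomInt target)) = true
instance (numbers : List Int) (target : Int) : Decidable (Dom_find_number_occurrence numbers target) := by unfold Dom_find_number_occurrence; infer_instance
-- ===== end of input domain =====

-- B jumps from match to match with list.index(target, start) instead of testing
-- every element itself, then derives negatives and the count (objective: alternative).

-- ===== PORT A =====
-- one loop over enumerate(numbers) maintaining three accumulators in lockstep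
def find_number_occurrence (numbers : List Int) (target : Int) : List Int × List Int × Int :=
  (PySem.List.enumerate numbers).foldl
    (fun (st : List Int × List Int × Int) (p : Int × Int) =>
      if p.2 == target then
        (st.1 ++ [p.1], st.2.1 ++ [p.1 - (PySem.List.len numbers : Int)], st.2.2 + 1)
      else st)
    ([], [], 0)

-- ===== PORT B =====
-- numbers.index(target, start): Python searches numbers[start:] and returns the
-- absolute index (ValueError = none). Exact for the nonneg starts B uses: ported
-- by hand as index? on the dropped suffix, shifted back by start.
def fnoSearch (xs : List Int) (t : Int) (s : Nat) : Option Nat :=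
  (PySem.List.index? (xs.drop s) t).map (· + s)

-- needed by fnoCollect's decreasing_by
theorem fnoSearch_bounds {xs : List Int} {t : Int} {s i : Nat}
    (h : fnoSearch xs t s = some i) : s ≤ i ∧ i < xs.length := by
  unfold fnoSearch at h
  cases hj : PySem.List.index? (xs.drop s) t with
  | none => rw [hj] at h; exact absurd h (by simp)
  | some j =>
    obtain ⟨hk, -, -⟩ := PySem.List.getElem_of_index?_eq_some hj
    rw [hj] at h
    simp only [Option.map_some, Option.some.injEq] at h
    subst h
    constructor
    · omega
    · have := List.length_drop (l := xs) (i := s)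
      omega

-- the while-True loop: search, append, restart just after the hit
def fnoCollect (xs : List Int) (t : Int) (s : Nat) : List Int :=
  match h : fnoSearch xs t s with
  | none => []
  | some i => (i : Int) :: fnoCollect xs t (i + 1)
termination_by xs.length - s
decreasing_by
  have := fnoSearch_bounds h
  omega

def find_number_occurrence_alt (numbers : List Int) (target : Int) : List Int × List Int × Int :=
  let positive_indices := fnoCollect numbers target 0
  let n : Int := PySem.List.len numbers
  (positive_indices, positive_indices.map (fun i => i - n), (positive_indices.length : Int))

-- ===== PRECONDITION & SPEC =====
def Spec_find_number_occurrence (numbers : List Int) (target : Int) (out : List Int × List Int × Int) : Prop := out = find_number_occurrence_alt numbers target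
instance (numbers : List Int) (target : Int) (out : List Int × List Int × Int) : Decidable (Spec_find_number_occurrence numbers target out) := by unfold Spec_find_number_occurrence; infer_instance

-- ===== CLAIM (what is proved, stated in full; the proofs are below) =====
def Claim_equal_find_number_occurrence : Prop := ∀ (numbers : List Int) (target : Int), Dom_find_number_occurrence numbers target → Spec_find_number_occurrence numbers target (find_number_occurrence numbers target)

-- ===== LEMMAS AND PROOFS =====

-- loop invariant for A: the foldl over any enumerated list extends the three
-- accumulators by the filtered matching indices
theorem fno_foldl_inv (target : Int) (L : Int) (ps : List (Int × Int))
    (a b : List Int) (c : Int) :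
    ps.foldl
      (fun (st : List Int × List Int × Int) (p : Int × Int) =>
        if p.2 == target then (st.1 ++ [p.1], st.2.1 ++ [p.1 - L], st.2.2 + 1) else st)
      (a, b, c)
    = (a ++ ((ps.filter (fun p => p.2 == target)).map (fun p => p.1)),
       b ++ ((ps.filter (fun p => p.2 == target)).map (fun p => p.1 - L)),
       c + (((ps.filter (fun p => p.2 == target)).map (fun p => p.1)).length : Int)) := by
  induction ps generalizing a b c with
  | nil => simp
  | cons p ps ih =>
    by_cases h : p.2 == target
    · rw [List.foldl_cons, if_pos h, ih]
      simp [h]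
      omega
    · rw [List.foldl_cons, if_neg h, ih]
      simp [h]

-- B's index-jumping loop collects exactly the matching indices of the suffix
theorem fnoCollect_eq (xs : List Int) (t : Int) (s : Nat) :
    fnoCollect xs t s
      = ((PySem.List.enumerate (xs.drop s) (s : Int)).filter
          (fun p => p.2 == t)).map (fun p => p.1) := by
  induction s using fnoCollect.induct xs t with
  | case1 s h =>
    rw [fnoCollect]
    split
    case h_2 i h' => rw [h'] at h; exact absurd h (by simp)
    case h_1 h' =>
      have hnone : PySem.List.index? (xs.drop s) t = none := by
        unfold fnoSearch at h
        cases hj : PySem.List.index? (xs.drop s) t with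
        | none => rfl
        | some j => rw [hj] at h; exact absurd h (by simp)
      have hnot : t ∉ xs.drop s := (PySem.List.index?_eq_none_iff _ _).mp hnone
      have hfil : (PySem.List.enumerate (xs.drop s) (s : Int)).filter (fun p => p.2 == t) = [] := by
        rw [List.filter_eq_nil_iff]
        intro p hp
        obtain ⟨k, hk, rfl⟩ := (PySem.List.mem_enumerate_iff _ _ _).mp hp
        simp only [beq_iff_eq]
        intro he
        exact hnot (he ▸ List.getElem_mem hk)
      simp [hfil]
  | case2 s i h ih =>
    rw [fnoCollect]
    split
    case h_1 h' => rw [h'] at h; exact absurd h (by simp)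
    case h_2 i' h' =>
      rw [h'] at h
      have hii : i = i' := by simpa using h.symm
      subst hii
      -- decode the successful search: i = j + s with j the first match in the suffix
      unfold fnoSearch at h'
      cases hj : PySem.List.index? (xs.drop s) t with
      | none => rw [hj] at h'; exact absurd h' (by simp)
      | some j =>
        rw [hj] at h'
        simp only [Option.map_some, Option.some.injEq] at h'
        obtain ⟨pre, suf, hsplit, hlen, hnotpre⟩ := (PySem.List.index?_eq_some_iff _ _ _).mp hj
        have hdrop : xs.drop (i + 1) = suf := by
          have h1 : xs.drop (i + 1) = (xs.drop s).drop (j + 1) := by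
            rw [List.drop_drop]; congr 1; omega
          rw [h1, hsplit]
          have h2 : pre ++ t :: suf = (pre ++ [t]) ++ suf := by simp
          have h3 : (pre ++ [t]).length = j + 1 := by simp [hlen]
          rw [h2, ← h3, List.drop_left]
        rw [ih, hdrop, hsplit, PySem.List.enumerate_append, PySem.List.enumerate_cons]
        have hpre : (PySem.List.enumerate pre (s : Int)).filter (fun p => p.2 == t) = [] := by
          rw [List.filter_eq_nil_iff]
          intro p hp
          obtain ⟨k, hk, rfl⟩ := (PySem.List.mem_enumerate_iff _ _ _).mp hp
          simp only [beq_iff_eq]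
          intro he
          exact hnotpre (he ▸ List.getElem_mem hk)
        rw [List.filter_append, hpre]
        simp only [List.nil_append, List.filter_cons, beq_self_eq_true, if_pos,
          List.map_cons]
        have hi : (i : Int) = (s : Int) + (pre.length : Int) := by
          push_cast [hlen]; omega
        rw [← hi]
        norm_cast

-- ===== VERDICT (by name: the statement is the Claim_ definition above) =====
theorem find_number_occurrence_spec : Claim_equal_find_number_occurrence := by
  intro numbers target _
  unfold Spec_find_number_occurrence find_number_occurrence find_number_occurrence_alt
  rw [fno_foldl_inv, fnoCollect_eq]
  simp [List.map_map, Function.comp]
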